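-- pv_equiv track=rewrite | github.com/Myshiak/Myshiak.su-discord-bot | main2.py | isOneEl
-- ===== SOURCE A (Python) =====
-- def isOneEl(l: list, limit: int) -> bool:
--     ct = 0
--     for i in l[::-1]:
--         if i == l[-1]:
--             ct += 1
--         else:
--             break
--     if ct == limit:
--         return True
--     else:
--         return False
-- ===== SOURCE B (Python) =====
-- def isOneEl(l: list, limit: int) -> bool:
--     # Forward single pass: maintain the length of the current run of equal
--     # elements; at the end it holds the trailing run's length.
--     ct = 0
--     prev = None
--     for x in l:
--         ct = ct + 1 if (ct > 0 and x == prev) else 1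
--         prev = x
--     return ct == limit
-- ===== Notes on version B (the rewrite author's own statement) =====
-- stated objective: alternative
-- what changed: B replaces A's reversed-list early-break scan comparing each element to l[-1] with a single forward pass that maintains the current run length (reset on change), whose final value is the trailing run length.
import Mathlib
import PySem

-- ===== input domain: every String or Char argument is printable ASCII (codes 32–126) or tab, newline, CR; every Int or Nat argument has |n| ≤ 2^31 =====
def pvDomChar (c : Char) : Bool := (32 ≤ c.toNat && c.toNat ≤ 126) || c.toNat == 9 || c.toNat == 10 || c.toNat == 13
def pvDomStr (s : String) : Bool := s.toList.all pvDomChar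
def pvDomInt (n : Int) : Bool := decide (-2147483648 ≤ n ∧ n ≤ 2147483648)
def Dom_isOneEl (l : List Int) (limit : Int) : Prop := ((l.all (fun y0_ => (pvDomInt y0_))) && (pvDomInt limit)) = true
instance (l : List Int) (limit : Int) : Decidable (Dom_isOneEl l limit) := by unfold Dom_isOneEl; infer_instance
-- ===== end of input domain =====

-- B replaces A's reversed-list early-break scan (comparing to l[-1]) with a forward
-- single pass maintaining the current run length; same O(n) cost, different traversal.

-- ===== PORT A =====
-- the 'for i in l[::-1]: if i == l[-1]: ct += 1 else: break' loop
def isOneElLoop (last : Option Int) : List Int → Int → Int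
  | [], ct => ct
  | i :: rest, ct => if some i = last then isOneElLoop last rest (ct + 1) else ct

def isOneEl (l : List Int) (limit : Int) : Bool :=
  let ct := isOneElLoop (PySem.List.pyGet? l (-1)) ((PySem.List.slice? l none none (-1)).getD []) 0
  if ct = limit then true else false

-- ===== PORT B =====
def isOneEl_alt (l : List Int) (limit : Int) : Bool :=
  let st := l.foldl
    (fun (st : Int × Option Int) x =>
      (if 0 < st.1 ∧ some x = st.2 then st.1 + 1 else 1, some x))
    (0, none)
  st.1 == limit

-- ===== PRECONDITION & SPEC =====
def Spec_isOneEl (l : List Int) (limit : Int) (out : Bool) : Prop := out = isOneEl_alt l limit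
instance (l : List Int) (limit : Int) (out : Bool) : Decidable (Spec_isOneEl l limit out) := by unfold Spec_isOneEl; infer_instance

-- ===== CLAIM (what is proved, stated in full; the proofs are below) =====
def Claim_equal_isOneEl : Prop := ∀ (l : List Int) (limit : Int), Dom_isOneEl l limit → Spec_isOneEl l limit (isOneEl l limit)

-- ===== LEMMAS AND PROOFS =====

-- B's folded state, named for the proofs
def altState (l : List Int) : Int × Option Int :=
  l.foldl
    (fun (st : Int × Option Int) x =>
      (if 0 < st.1 ∧ some x = st.2 then st.1 + 1 else 1, some x))
    (0, none)

theorem altState_append_singleton (l : List Int) (a : Int) :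
    altState (l ++ [a]) =
      (if 0 < (altState l).1 ∧ some a = (altState l).2 then (altState l).1 + 1 else 1, some a) := by
  simp [altState, List.foldl_append]

-- A's loop shifts over its accumulator
theorem isOneElLoop_acc (last : Option Int) (xs : List Int) (ct : Int) :
    isOneElLoop last xs ct = ct + isOneElLoop last xs 0 := by
  induction xs generalizing ct with
  | nil => simp [isOneElLoop]
  | cons x rest ih =>
    simp only [isOneElLoop]
    split
    · rw [ih (ct + 1), ih (0 + 1)]; ring
    · simp

-- A's loop counts nonnegatively
theorem isOneElLoop_nonneg (last : Option Int) (xs : List Int) :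
    0 ≤ isOneElLoop last xs 0 := by
  induction xs with
  | nil => simp [isOneElLoop]
  | cons x rest ih =>
    simp only [isOneElLoop]
    split
    · rw [isOneElLoop_acc]; omega
    · omega

-- main invariant: B's folded state is (A's trailing-run count, last element)
theorem isOneElLoop_cons (last : Option Int) (x : Int) (xs : List Int) :
    isOneElLoop last (x :: xs) 0 = if some x = last then 1 + isOneElLoop last xs 0 else 0 := by
  simp only [isOneElLoop]
  split
  · rw [isOneElLoop_acc]; ring
  · rfl

theorem altState_eq (l : List Int) :
    altState l = (isOneElLoop (l.getLast?) l.reverse 0, l.getLast?) := by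
  induction l using List.reverseRecOn with
  | nil => simp [altState, isOneElLoop]
  | append_singleton ys a ih =>
    rw [altState_append_singleton, ih]
    have hrev : (ys ++ [a]).reverse = a :: ys.reverse := by simp
    rw [List.getLast?_concat, hrev, isOneElLoop_cons, if_pos rfl]
    cases hys : ys.getLast? with
    | none =>
      have : ys = [] := List.getLast?_eq_none_iff.mp hys
      subst this
      rw [if_neg (by simp)]
      simp [isOneElLoop]
    | some b =>
      obtain ⟨zs, rfl⟩ : ∃ zs, ys = zs ++ [b] := by
        rcases List.getLast?_eq_some_iff.mp hys with ⟨zs, rfl⟩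
        exact ⟨zs, rfl⟩
      have hzrev : (zs ++ [b]).reverse = b :: zs.reverse := by simp
      have hpos : 0 < isOneElLoop (some b) (zs ++ [b]).reverse 0 := by
        rw [hzrev, isOneElLoop_cons, if_pos rfl]
        have := isOneElLoop_nonneg (some b) zs.reverse
        omega
      by_cases hab : a = b
      · subst hab
        rw [if_pos ⟨hpos, rfl⟩, Prod.mk.injEq]
        exact ⟨by ring, rfl⟩
      · rw [if_neg (by simp [hab]), hzrev, isOneElLoop_cons,
          if_neg (by simp; exact fun h => hab h.symm), Prod.mk.injEq]
        exact ⟨by ring, rfl⟩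

-- ===== VERDICT (by name: the statement is the Claim_ definition above) =====
theorem isOneEl_spec : Claim_equal_isOneEl := by
  intro l limit _
  show isOneEl l limit = isOneEl_alt l limit
  have halt : isOneEl_alt l limit = ((altState l).1 == limit) := rfl
  rw [halt, altState_eq]
  simp only [isOneEl, PySem.List.pyGet?_neg_one, PySem.List.slice?_none_none_neg_one,
    Option.getD_some]
  by_cases h : isOneElLoop l.getLast? l.reverse 0 = limit <;> simp [h]
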